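-- pv_equiv track=rewrite | github.com/KazukiNoSuzaku/Leetcode | Python/0770_Basic_Calculator_IV.py | basicCalculatorIV
-- ===== SOURCE A (Python) =====
-- from collections import defaultdict
--
-- def basicCalculatorIV(expression, evalvars, evalints):
--     lookup = dict(zip(evalvars, evalints))
--     def make(val):
--         poly = defaultdict(int)
--         if isinstance(val, int):
--             poly[()] = val
--         else:
--             poly[(val,)] = 1
--         return poly
--     def combine(a, b, op):
--         res = defaultdict(int)
--         if op == '+':
--             for k, v in list(a.items()) + list(b.items()):
--                 res[k] += v
--         elif op == '-':
--             for k, v in a.items(): res[k] += v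
--             for k, v in b.items(): res[k] -= v
--         else:
--             for k1, v1 in a.items():
--                 for k2, v2 in b.items():
--                     res[tuple(sorted(k1+k2))] += v1 * v2
--         return {k: v for k, v in res.items() if v}
--     def parse(tokens):
--         stack = []
--         op = '+'
--         while tokens:
--             t = tokens.pop()
--             if t == '(':
--                 val = parse(tokens)
--             elif t == ')':
--                 break
--             elif t.lstrip('-').isdigit():
--                 val = make(int(t))
--             elif t in lookup:
--                 val = make(lookup[t])
--             elif t in '+-*':
--                 op = t
--                 continue
--             else:
--                 val = make(t)
--             if op == '+': stack.append(val)
--             elif op == '-': stack.append(combine(defaultdict(int), val, '-'))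
--             else: stack.append(combine(stack.pop(), val, '*'))
--         res = defaultdict(int)
--         for poly in stack:
--             for k, v in poly.items(): res[k] += v
--         return res
--     tokens = expression.replace('(', '( ').replace(')', ' )').split()
--     poly = parse(tokens[::-1])
--     def fmt(k, v):
--         parts = list(k) + [str(v)]
--         return '*'.join(parts) if k else str(v)
--     return [fmt(k, v) for k, v in sorted(poly.items(), key=lambda x: (-len(x[0]), x[0])) if v]
-- ===== SOURCE B (Python) =====
-- def basicCalculatorIV(expression, evalvars, evalints):
--     lookup = dict(zip(evalvars, evalints))
--
--     # Polynomials are kept as CANONICAL lists: (key, coeff) pairs with nonzero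
--     # coefficients, strictly ordered by the output order (-len(key), key).
--     # The final answer is then just a formatting pass: no dict, no sort, no filter.
--
--     def key_lt(k1, k2):
--         return (-len(k1), k1) < (-len(k2), k2)
--
--     def add_term(p, k, c):
--         # insert c*k into canonical p, keeping it canonical
--         if not p:
--             return [(k, c)] if c else []
--         (k0, c0) = p[0]
--         if key_lt(k0, k):
--             return [(k0, c0)] + add_term(p[1:], k, c)
--         if k0 == k:
--             s = c0 + c
--             return ([(k, s)] if s else []) + p[1:]
--         return ([(k, c)] if c else []) + p
--
--     def padd(p, q):
--         for k, c in q: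
--             p = add_term(p, k, c)
--         return p
--
--     def pneg(p):
--         return [(k, -c) for k, c in p]
--
--     def pmul(p, q):
--         res = []
--         for k1, c1 in p:
--             for k2, c2 in q:
--                 res = add_term(res, tuple(sorted(k1 + k2)), c1 * c2)
--         return res
--
--     def apply_operand(total, cur, op, val):
--         # fold a new operand into the running (sum-so-far, last-term) state
--         if op == '+':
--             return padd(total, cur), val
--         if op == '-':
--             return padd(total, cur), pneg(val)
--         return total, pmul(cur, val)
--
--     tokens = expression.replace('(', '( ').replace(')', ' )').split()
--     frames = []                      # saved (total, cur, op) of enclosing groups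
--     total, cur, op = [], [], '+'
--     for t in tokens:
--         if t == '(':
--             frames.append((total, cur, op))
--             total, cur, op = [], [], '+'
--         elif t == ')':
--             if not frames:
--                 break                # unmatched ')' at top level: rest ignored
--             val = padd(total, cur)
--             total, cur, op = frames.pop()
--             total, cur = apply_operand(total, cur, op, val)
--         elif t.lstrip('-').isdigit():
--             total, cur = apply_operand(total, cur, op, add_term([], (), int(t)))
--         elif t in lookup:
--             total, cur = apply_operand(total, cur, op, add_term([], (), lookup[t]))
--         elif t in '+-*':
--             op = t
--         else:
--             total, cur = apply_operand(total, cur, op, add_term([], (t,), 1))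
--     while frames:                    # unclosed '(': unwind as if groups ended here
--         val = padd(total, cur)
--         total, cur, op = frames.pop()
--         total, cur = apply_operand(total, cur, op, val)
--     poly = padd(total, cur)
--     return ['*'.join(list(k) + [str(c)]) if k else str(c) for k, c in poly]
-- ===== Notes on version B (the rewrite author's own statement) =====
-- stated objective: alternative
-- what changed: A's dict-of-monomials polynomials plus a final sort-and-filter, built by a recursive-descent parser over a reversed token list, are replaced by canonical sorted association lists (nonzero coefficients kept strictly in the output order by ordered insertion/merging) evaluated in one forward scan with an explicit frame stack, so the dict, the recursion, the final sort and the zero-filter all disappear.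
import Mathlib
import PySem

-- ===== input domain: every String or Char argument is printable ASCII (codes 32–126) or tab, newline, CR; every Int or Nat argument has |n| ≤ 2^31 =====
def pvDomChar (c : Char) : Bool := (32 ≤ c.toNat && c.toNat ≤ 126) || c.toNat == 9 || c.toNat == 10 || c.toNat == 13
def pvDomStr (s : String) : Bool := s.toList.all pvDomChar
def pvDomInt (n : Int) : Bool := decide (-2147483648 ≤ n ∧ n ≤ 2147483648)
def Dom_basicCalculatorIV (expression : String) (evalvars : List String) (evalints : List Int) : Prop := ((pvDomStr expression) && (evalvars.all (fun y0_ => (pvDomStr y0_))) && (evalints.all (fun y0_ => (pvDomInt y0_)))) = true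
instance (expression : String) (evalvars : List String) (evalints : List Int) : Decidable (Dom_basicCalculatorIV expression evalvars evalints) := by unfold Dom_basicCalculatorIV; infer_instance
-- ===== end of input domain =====

-- B replaces A's dict-of-monomials polynomials and its recursive-descent parser by a different
-- data structure and traversal: polynomials are CANONICAL sorted association lists (nonzero
-- coefficients, strictly ordered by the output order (-len(key), key), maintained by ordered
-- insertion), evaluated by one forward token scan with an explicit frame stack, so the final
-- sort, the zero-filter and the dict all disappear.

-- A polynomial on the A side: Python dict keyed by tuples of variable names, valued by ints.
abbrev PvPoly := PySem.Dict (List String) Int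

-- ===== PORT A =====

-- make(val) for an int argument: poly[()] = val
def pvAMakeInt (v : Int) : PvPoly := PySem.Dict.empty.insert [] v
-- make(val) for a str argument: poly[(val,)] = 1
def pvAMakeVar (s : String) : PvPoly := PySem.Dict.empty.insert [s] 1

-- combine(a, b, op); defaultdict's res[k] += v is insert k (getD k 0 + v)
def pvACombine (a b : PvPoly) (op : String) : PvPoly :=
  let res : PvPoly :=
    if op == "+" then
      (a.items ++ b.items).foldl (fun d kv => d.insert kv.1 (d.getD kv.1 0 + kv.2)) PySem.Dict.empty
    else if op == "-" then
      let r := a.items.foldl (fun d kv => d.insert kv.1 (d.getD kv.1 0 + kv.2)) (PySem.Dict.empty : PvPoly)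
      b.items.foldl (fun d kv => d.insert kv.1 (d.getD kv.1 0 - kv.2)) r
    else
      a.items.foldl (fun d kv1 =>
        b.items.foldl (fun d kv2 =>
          d.insert (PySem.List.sorted (kv1.1 ++ kv2.1) (fun s => s) false)
            (d.getD (PySem.List.sorted (kv1.1 ++ kv2.1) (fun s => s) false) 0 + kv1.2 * kv2.2)) d)
        (PySem.Dict.empty : PvPoly)
  -- {k: v for k, v in res.items() if v}
  PySem.Dict.mk (res.items.filter (fun kv => kv.2 != 0))

-- pushing a value per the pending op (the three stack.append branches of parse);
-- on '*' with an empty stack Python raises IndexError — Pre_ excludes that input,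
-- here the total function multiplies into an empty polynomial instead
def pvAPush (stack : List PvPoly) (op : String) (val : PvPoly) : List PvPoly :=
  if op == "+" then val :: stack
  else if op == "-" then pvACombine PySem.Dict.empty val "-" :: stack
  else
    match stack with
    | h :: t => pvACombine h val "*" :: t
    | [] => [pvACombine PySem.Dict.empty val "*"]

-- final summation of the stack (res[k] += v over the stack in Python append order;
-- our stack keeps the top at the head, so Python order is .reverse)
def pvASum (stack : List PvPoly) : PvPoly :=
  stack.reverse.foldl
    (fun res p => p.items.foldl (fun d kv => d.insert kv.1 (d.getD kv.1 0 + kv.2)) res)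
    PySem.Dict.empty

-- parse(tokens): Python pops from the end of the reversed list, i.e. consumes the original
-- token list front to back; here the list is consumed head-first (exact).
-- int(t) is PySem.Int.ofStr?; it is none exactly when t has ≥ 2 leading '-' (Python raises
-- ValueError there; Pre_ excludes those inputs, .getD 0 only totalises).
-- t.lstrip('-') is dropWhile (· == '-') on the characters (exact for a one-char strip set).
def pvAParse (lookup : PySem.Dict String Int) :
    (ts : List String) → List PvPoly → String → PvPoly × {r : List String // r.length ≤ ts.length}
  | [], stack, _ => (pvASum stack, ⟨[], Nat.le_refl 0⟩)
  | t :: rest, stack, op =>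
    if t == "(" then
      let v1 := pvAParse lookup rest [] "+"
      have h1 : v1.2.1.length ≤ rest.length := v1.2.2
      let v2 := pvAParse lookup v1.2.1 (pvAPush stack op v1.1) op
      (v2.1, ⟨v2.2.1, Nat.le_trans v2.2.2 (Nat.le_trans h1 (Nat.le_succ _))⟩)
    else if t == ")" then (pvASum stack, ⟨rest, Nat.le_succ _⟩)
    else if PySem.Chars.strIsdigit (t.toList.dropWhile (· == '-')) then
      let v := pvAParse lookup rest (pvAPush stack op (pvAMakeInt ((PySem.Int.ofStr? t).getD 0))) op
      (v.1, ⟨v.2.1, Nat.le_trans v.2.2 (Nat.le_succ _)⟩)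
    else if lookup.contains t then
      let v := pvAParse lookup rest (pvAPush stack op (pvAMakeInt (lookup.getD t 0))) op
      (v.1, ⟨v.2.1, Nat.le_trans v.2.2 (Nat.le_succ _)⟩)
    else if PySem.Str.isIn t "+-*" then
      let v := pvAParse lookup rest stack t
      (v.1, ⟨v.2.1, Nat.le_trans v.2.2 (Nat.le_succ _)⟩)
    else
      let v := pvAParse lookup rest (pvAPush stack op (pvAMakeVar t)) op
      (v.1, ⟨v.2.1, Nat.le_trans v.2.2 (Nat.le_succ _)⟩)
  termination_by ts => ts.length
  decreasing_by all_goals simp_wf <;> omega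

def basicCalculatorIV (expression : String) (evalvars : List String) (evalints : List Int) : List String :=
  let lookup : PySem.Dict String Int :=
    (evalvars.zip evalints).foldl (fun d kv => d.insert kv.1 kv.2) PySem.Dict.empty
  let tokens := PySem.Str.split₀ (PySem.Str.replace (PySem.Str.replace expression "(" "( ") ")" " )")
  let poly := (pvAParse lookup tokens [] "+").1
  let sortedItems := PySem.List.sorted poly.items (fun x => toLex (-(x.1.length : Int), x.1)) false
  (sortedItems.filter (fun kv => kv.2 != 0)).map
    (fun kv => if kv.1 != [] then PySem.Str.join "*" (kv.1 ++ [PySem.Int.toStr kv.2]) else PySem.Int.toStr kv.2)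

-- ===== PORT B =====

-- B's polynomial: a canonical association list — nonzero coefficients only, keys strictly
-- increasing in the output order (-len(key), key).
abbrev PvBPoly := List (List String × Int)

-- the output order on monomial keys: key_lt(k1, k2) = (-len(k1), k1) < (-len(k2), k2)
def pvKeyOf (k : List String) : Lex (Int × List String) := toLex (-(k.length : Int), k)
def pvKlt (a b : List String) : Bool := decide (pvKeyOf a < pvKeyOf b)

-- add_term(p, k, c): ordered insertion of one monomial into a canonical list
def pvAddTerm : PvBPoly → List String → Int → PvBPoly
  | [], k, c => if c = 0 then [] else [(k, c)]
  | (k0, c0) :: rest, k, c =>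
    if pvKlt k0 k then (k0, c0) :: pvAddTerm rest k c
    else if k0 = k then (if c0 + c = 0 then [] else [(k, c0 + c)]) ++ rest
    else (if c = 0 then [] else [(k, c)]) ++ (k0, c0) :: rest

-- padd(p, q)
def pvPadd (p q : PvBPoly) : PvBPoly := q.foldl (fun p kv => pvAddTerm p kv.1 kv.2) p

-- pneg(p)
def pvPneg (p : PvBPoly) : PvBPoly := p.map (fun kv => (kv.1, -kv.2))

-- pmul(p, q)
def pvPmul (p q : PvBPoly) : PvBPoly :=
  p.foldl (fun res kv1 =>
    q.foldl (fun res kv2 =>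
      pvAddTerm res (PySem.List.sorted (kv1.1 ++ kv2.1) (fun s => s) false) (kv1.2 * kv2.2)) res) []

-- apply_operand(total, cur, op, val)
def pvBApply (total cur : PvBPoly) (op : String) (val : PvBPoly) : PvBPoly × PvBPoly :=
  if op == "+" then (pvPadd total cur, val)
  else if op == "-" then (pvPadd total cur, pvPneg val)
  else (total, pvPmul cur val)

-- the trailing 'while frames: …' unwind plus the final padd
def pvBUnwind : List (PvBPoly × PvBPoly × String) → PvBPoly → PvBPoly → PvBPoly
  | [], total, cur => pvPadd total cur
  | (t0, c0, o0) :: fs, total, cur =>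
    let val := pvPadd total cur
    let tc := pvBApply t0 c0 o0 val
    pvBUnwind fs tc.1 tc.2

-- the forward token scan (int(t), lstrip as in port A)
def pvBScan (lookup : PySem.Dict String Int) :
    List String → List (PvBPoly × PvBPoly × String) → PvBPoly → PvBPoly → String → PvBPoly
  | [], frames, total, cur, _ => pvBUnwind frames total cur
  | t :: rest, frames, total, cur, op =>
    if t == "(" then
      pvBScan lookup rest ((total, cur, op) :: frames) [] [] "+"
    else if t == ")" then
      match frames with
      | [] => pvPadd total cur        -- break: remaining tokens ignored
      | (t0, c0, o0) :: fs =>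
        let val := pvPadd total cur
        let tc := pvBApply t0 c0 o0 val
        pvBScan lookup rest fs tc.1 tc.2 o0
    else if PySem.Chars.strIsdigit (t.toList.dropWhile (· == '-')) then
      let tc := pvBApply total cur op (pvAddTerm [] [] ((PySem.Int.ofStr? t).getD 0))
      pvBScan lookup rest frames tc.1 tc.2 op
    else if lookup.contains t then
      let tc := pvBApply total cur op (pvAddTerm [] [] (lookup.getD t 0))
      pvBScan lookup rest frames tc.1 tc.2 op
    else if PySem.Str.isIn t "+-*" then
      pvBScan lookup rest frames total cur t
    else
      let tc := pvBApply total cur op (pvAddTerm [] [t] 1)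
      pvBScan lookup rest frames tc.1 tc.2 op

def basicCalculatorIV_alt (expression : String) (evalvars : List String) (evalints : List Int) : List String :=
  let lookup : PySem.Dict String Int :=
    (evalvars.zip evalints).foldl (fun d kv => d.insert kv.1 kv.2) PySem.Dict.empty
  let tokens := PySem.Str.split₀ (PySem.Str.replace (PySem.Str.replace expression "(" "( ") ")" " )")
  let poly := pvBScan lookup tokens [] [] [] "+"
  poly.map
    (fun kv => if kv.1 != [] then PySem.Str.join "*" (kv.1 ++ [PySem.Int.toStr kv.2]) else PySem.Int.toStr kv.2)

-- ===== PRECONDITION & SPEC =====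

-- grammar acceptance scan for Pre_: per parenthesis group it tracks whether an operand has
-- been seen yet (seen) and whether the pending operator is multiplicative (mul): an operand
-- or '(' while mul ∧ ¬seen is Python's pop-from-empty-stack IndexError, and an integer token
-- with ≥ 2 leading '-' is Python's int() ValueError; a top-level ')' stops the scan as A
-- stops parsing there.  It checks shape only — it computes no polynomial values.
def pvPreScan (keys : List String) : List String → List (Bool × Bool) → Bool → Bool → Bool
  | [], _, _, _ => true
  | t :: rest, fs, seen, mul =>
    if t == "(" then
      if mul && !seen then false else pvPreScan keys rest ((true, mul) :: fs) false false
    else if t == ")" then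
      match fs with
      | [] => true
      | (s, m) :: fs' => pvPreScan keys rest fs' s m
    else if PySem.Chars.strIsdigit (t.toList.dropWhile (· == '-')) then
      if 2 ≤ (t.toList.takeWhile (· == '-')).length then false
      else if mul && !seen then false else pvPreScan keys rest fs true mul
    else if keys.contains t then
      if mul && !seen then false else pvPreScan keys rest fs true mul
    else if PySem.Str.isIn t "+-*" then
      pvPreScan keys rest fs seen (!(t == "+") && !(t == "-"))
    else
      if mul && !seen then false else pvPreScan keys rest fs true mul

-- Pre_ holds exactly where the Python A returns normally (it excludes only the inputs on
-- which A raises IndexError or ValueError, as above).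
def Pre_basicCalculatorIV (expression : String) (evalvars : List String) (evalints : List Int) : Prop :=
  pvPreScan ((evalvars.zip evalints).map Prod.fst)
    (PySem.Str.split₀ (PySem.Str.replace (PySem.Str.replace expression "(" "( ") ")" " )"))
    [] false false = true

instance (expression : String) (evalvars : List String) (evalints : List Int) : Decidable (Pre_basicCalculatorIV expression evalvars evalints) := by unfold Pre_basicCalculatorIV; infer_instance

def pvWitness_basicCalculatorIV : String × List String × List Int := ("(e + 8) * (e - 8)", ["e"], [3])

def Spec_basicCalculatorIV (expression : String) (evalvars : List String) (evalints : List Int) (out : List String) : Prop := out = basicCalculatorIV_alt expression evalvars evalints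
instance (expression : String) (evalvars : List String) (evalints : List Int) (out : List String) : Decidable (Spec_basicCalculatorIV expression evalvars evalints out) := by unfold Spec_basicCalculatorIV; infer_instance

-- ===== CLAIM (what is proved, stated in full; the proofs are below) =====
def Claim_equal_basicCalculatorIV : Prop := ∀ (expression : String) (evalvars : List String) (evalints : List Int), Dom_basicCalculatorIV expression evalvars evalints → Pre_basicCalculatorIV expression evalvars evalints → Spec_basicCalculatorIV expression evalvars evalints (basicCalculatorIV expression evalvars evalints)

-- ===== LEMMAS AND PROOFS =====

-- first-match-or-0 lookup: the shared semantics of an A dict (on its items) and a B list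
def pvVal : List (List String × Int) → List String → Int
  | [], _ => 0
  | (k, c) :: t, q => if k = q then c else pvVal t q

-- B's representation invariant
def pvCanon (P : PvBPoly) : Prop :=
  P.Pairwise (fun a b => pvKeyOf a.1 < pvKeyOf b.1) ∧ ∀ kv ∈ P, kv.2 ≠ 0

-- the simulation relation between an A-side dict and a B-side canonical list
def pvR (d : PvPoly) (P : PvBPoly) : Prop :=
  d.keys.Nodup ∧ pvCanon P ∧ ∀ q, d.getD q 0 = pvVal P q

def pvSumAt (l : List (List String × Int)) (q : List String) : Int :=
  (l.map (fun kv => if kv.1 = q then kv.2 else 0)).sum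

def pvWSum (l : List (List String × Int)) (w : List String → Int) : Int :=
  (l.map (fun kv => kv.2 * w kv.1)).sum

theorem pvKeyOf_inj (a b : List String) (h : pvKeyOf a = pvKeyOf b) : a = b := by
  have := congrArg (fun x => (ofLex x).2) h; simpa [pvKeyOf] using this

theorem pvKlt_gt (k0 k : List String) (h1 : pvKlt k0 k = false) (h2 : k0 ≠ k) :
    pvKeyOf k < pvKeyOf k0 := by
  rcases lt_trichotomy (pvKeyOf k0) (pvKeyOf k) with h | h | h
  · exact absurd h (by simpa [pvKlt] using h1)
  · exact absurd (pvKeyOf_inj _ _ h) h2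
  · exact h

theorem pvVal_eq_zero_of_forall_ne (l : List (List String × Int)) (q : List String)
    (h : ∀ kv ∈ l, kv.1 ≠ q) : pvVal l q = 0 := by
  induction l with
  | nil => rfl
  | cons kv t ih =>
    obtain ⟨k, c⟩ := kv
    simp only [pvVal]
    rw [if_neg (h (k, c) (List.mem_cons_self))]
    exact ih (fun kv hm => h kv (List.mem_cons_of_mem _ hm))

theorem pvMem_addTerm (P : PvBPoly) (k : List String) (c : Int) :
    ∀ kv ∈ pvAddTerm P k c, kv ∈ P ∨ kv.1 = k := by
  induction P with
  | nil =>
    intro kv h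
    simp only [pvAddTerm] at h
    split at h <;> simp_all
  | cons p rest ih =>
    obtain ⟨k0, c0⟩ := p
    intro kv h
    simp only [pvAddTerm] at h
    split at h
    · rcases List.mem_cons.mp h with h | h
      · exact Or.inl (by simp [h])
      · rcases ih kv h with h' | h'
        · exact Or.inl (List.mem_cons_of_mem _ h')
        · exact Or.inr h'
    · split at h
      · rcases List.mem_append.mp h with h | h
        · split at h <;> simp_all
        · exact Or.inl (List.mem_cons_of_mem _ h)
      · rcases List.mem_append.mp h with h | h
        · split at h <;> simp_all
        · exact Or.inl h

theorem pvAddTerm_canon (P : PvBPoly) (k : List String) (c : Int) (h : pvCanon P) :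
    pvCanon (pvAddTerm P k c) := by
  induction P with
  | nil =>
    constructor
    · simp only [pvAddTerm]; split <;> simp
    · intro kv hm; simp only [pvAddTerm] at hm; split at hm <;> simp_all
  | cons p rest ih =>
    obtain ⟨k0, c0⟩ := p
    obtain ⟨hp, hz⟩ := h
    have hp' := (List.pairwise_cons.mp hp).2
    have hhead := (List.pairwise_cons.mp hp).1
    have hcrest : pvCanon rest := ⟨hp', fun kv hm => hz kv (List.mem_cons_of_mem _ hm)⟩
    simp only [pvAddTerm]
    split
    · next hlt =>
      obtain ⟨ihp, ihz⟩ := ih hcrest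
      constructor
      · refine List.pairwise_cons.mpr ⟨?_, ihp⟩
        intro kv hm
        rcases pvMem_addTerm rest k c kv hm with h' | h'
        · exact hhead kv h'
        · rw [h']; exact of_decide_eq_true hlt
      · intro kv hm
        rcases List.mem_cons.mp hm with h' | h'
        · rw [h']; exact hz (k0, c0) (List.mem_cons_self)
        · exact ihz kv h'
    · split
      · next hne heq =>
        constructor
        · split
          · simpa using hp'
          · refine List.pairwise_cons.mpr ⟨?_, hp'⟩
            intro kv hm
            have h0 := hhead kv hm
            rw [heq] at h0
            exact h0
        · intro kv hm
          rcases List.mem_append.mp hm with h' | h'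
          · split at h' <;> simp_all
          · exact hz kv (List.mem_cons_of_mem _ h')
      · next hne heq =>
        have hk : pvKeyOf k < pvKeyOf k0 := pvKlt_gt k0 k (by simpa using hne) (by simpa using heq)
        constructor
        · split
          · exact hp
          · refine List.pairwise_cons.mpr ⟨?_, hp⟩
            intro kv hm
            rcases List.mem_cons.mp hm with h' | h'
            · rw [h']; exact hk
            · exact lt_trans hk (hhead kv h')
        · intro kv hm
          rcases List.mem_append.mp hm with h' | h'
          · split at h' <;> simp_all
          · exact hz kv h'

theorem pvAddTerm_val (P : PvBPoly) (k : List String) (c : Int) (h : pvCanon P) (q : List String) :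
    pvVal (pvAddTerm P k c) q = pvVal P q + (if k = q then c else 0) := by
  induction P with
  | nil =>
    simp only [pvAddTerm, pvVal]
    split
    · next hc => subst hc; simp [pvVal]
    · simp only [pvVal]; by_cases hq : k = q <;> simp [hq]
  | cons p rest ih =>
    obtain ⟨k0, c0⟩ := p
    obtain ⟨hp, hz⟩ := h
    have hp' := (List.pairwise_cons.mp hp).2
    have hhead := (List.pairwise_cons.mp hp).1
    have hcrest : pvCanon rest := ⟨hp', fun kv hm => hz kv (List.mem_cons_of_mem _ hm)⟩
    simp only [pvAddTerm]
    by_cases hlt : pvKlt k0 k = true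
    · rw [if_pos hlt]
      simp only [pvVal]
      by_cases hq : k0 = q
      · have hkq : ¬ (k = q) := by
          intro hh
          have := of_decide_eq_true hlt
          rw [hq, hh] at this
          exact absurd this (lt_irrefl _)
        rw [if_pos hq, if_pos hq, if_neg hkq, add_zero]
      · rw [if_neg hq, if_neg hq, ih hcrest]
    · rw [if_neg hlt]
      by_cases heq : k0 = k
      · rw [if_pos heq]
        have hrest0 : pvVal rest k = 0 := by
          refine pvVal_eq_zero_of_forall_ne rest k (fun kv hm hh => ?_)
          have h0 := hhead kv hm
          rw [heq, hh] at h0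
          exact absurd h0 (lt_irrefl _)
        by_cases hq : k = q
        · subst hq
          rw [if_pos rfl]
          split
          · next h0 =>
            rw [List.nil_append, hrest0]
            simp only [pvVal, if_pos heq]
            omega
          · simp [pvVal, heq]
        · have hk0q : ¬ (k0 = q) := by rw [heq]; exact hq
          rw [if_neg hq, add_zero]
          split <;> simp [pvVal, hk0q, hq]
      · have hk : pvKeyOf k < pvKeyOf k0 := pvKlt_gt k0 k (by simpa using hlt) heq
        rw [if_neg heq]
        have hP0 : ∀ kv ∈ (k0, c0) :: rest, pvKeyOf k < pvKeyOf kv.1 := by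
          intro kv hm
          rcases List.mem_cons.mp hm with h' | h'
          · rw [h']; exact hk
          · exact lt_trans hk (hhead kv h')
        have hv0 : pvVal ((k0, c0) :: rest) k = 0 := by
          refine pvVal_eq_zero_of_forall_ne _ _ (fun kv hm hh => ?_)
          have h0 := hP0 kv hm
          rw [hh] at h0
          exact absurd h0 (lt_irrefl _)
        by_cases hq : k = q
        · subst hq
          rw [if_pos rfl]
          split
          · next h0 => simp [hv0, h0]
          · simp only [pvVal] at hv0
            simp [pvVal, hv0]
        · rw [if_neg hq, add_zero]
          split
          · simp
          · simp [pvVal, hq]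

theorem pvSumAt_zero (l : List (List String × Int)) (q : List String)
    (h : ∀ kv ∈ l, kv.1 ≠ q) : (l.map (fun kv => if kv.1 = q then kv.2 else 0)).sum = 0 := by
  induction l with
  | nil => rfl
  | cons kv t ih =>
    simp only [List.map_cons, List.sum_cons, if_neg (h kv List.mem_cons_self)]
    rw [ih (fun kv hm => h kv (List.mem_cons_of_mem _ hm))]
    simp

theorem pvSumAt_eq_pvVal (l : List (List String × Int)) (hnd : (l.map Prod.fst).Nodup)
    (q : List String) : pvSumAt l q = pvVal l q := by
  induction l with
  | nil => rfl
  | cons kv t ih =>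
    obtain ⟨k0, c0⟩ := kv
    simp only [List.map_cons, List.nodup_cons] at hnd
    simp only [pvSumAt, List.map_cons, List.sum_cons, pvVal]
    by_cases hq : k0 = q
    · rw [if_pos hq, if_pos hq]
      have h0 : ∀ kv ∈ t, kv.1 ≠ q := by
        intro kv hm hh
        have hmem : kv.1 ∈ List.map Prod.fst t := List.mem_map_of_mem hm
        rw [hh, ← hq] at hmem
        exact hnd.1 hmem
      rw [pvSumAt_zero t q h0]; simp
    · rw [if_neg hq, if_neg hq, zero_add]
      exact ih hnd.2

theorem pvFoldl_addTerm {β : Type} (key : β → List String) (coef : β → Int) :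
    ∀ (L : List β) (R : PvBPoly), pvCanon R →
      pvCanon (L.foldl (fun r x => pvAddTerm r (key x) (coef x)) R) ∧
      ∀ q, pvVal (L.foldl (fun r x => pvAddTerm r (key x) (coef x)) R) q =
        pvVal R q + (L.map (fun x => if key x = q then coef x else 0)).sum := by
  intro L
  induction L with
  | nil => intro R h; exact ⟨h, fun q => by simp⟩
  | cons x t ih =>
    intro R h
    obtain ⟨ih1, ih2⟩ := ih (pvAddTerm R (key x) (coef x)) (pvAddTerm_canon _ _ _ h)
    refine ⟨ih1, fun q => ?_⟩
    simp only [List.foldl_cons, List.map_cons, List.sum_cons]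
    rw [ih2 q, pvAddTerm_val _ _ _ h q]
    ring

theorem pvCanon_nil : pvCanon [] := ⟨List.Pairwise.nil, by simp⟩

theorem pvCanon_keys_nodup (P : PvBPoly) (h : pvCanon P) : (P.map Prod.fst).Nodup := by
  have hp := h.1
  have : (P.map Prod.fst).Pairwise (fun a b => pvKeyOf a < pvKeyOf b) :=
    List.pairwise_map.mpr hp
  exact List.Pairwise.imp (fun {a b} hab hh => absurd (hh ▸ hab) (lt_irrefl _)) this

theorem pvPneg_canon (P : PvBPoly) (h : pvCanon P) : pvCanon (pvPneg P) := by
  constructor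
  · exact List.pairwise_map.mpr (List.Pairwise.imp (fun hab => hab) h.1)
  · intro kv hm
    obtain ⟨kv', hm', he⟩ := List.mem_map.mp hm
    have := h.2 kv' hm'
    rw [← he]; simpa using this

theorem pvPneg_val (P : PvBPoly) (q : List String) : pvVal (pvPneg P) q = -pvVal P q := by
  induction P with
  | nil => simp [pvPneg, pvVal]
  | cons kv t ih =>
    obtain ⟨k, c⟩ := kv
    simp only [pvPneg, List.map_cons, pvVal] at *
    by_cases hq : k = q
    · simp [hq]
    · simp only [if_neg hq]; exact ih

theorem pvGetD_mk (l : List (List String × Int)) (q : List String) : (PySem.Dict.mk l).getD q 0 = pvVal l q := by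
  induction l with
  | nil => rfl
  | cons kv t ih =>
    obtain ⟨k, c⟩ := kv
    rw [PySem.Dict.getD_eq_get?_getD, PySem.Dict.get?_mk_cons]
    simp only [pvVal]
    by_cases hq : k = q
    · simp [hq]
    · have hq2 : ¬ ((k == q) = true) := by simpa using hq
      rw [if_neg hq2, if_neg hq, ← PySem.Dict.getD_eq_get?_getD, ih]
theorem pvGetD_foldl_acc {b : Type} (key : b → List String) (coef : b → Int) :
    ∀ (L : List b) (d0 : PvPoly) (q : List String),
      ((L.foldl (fun d x => d.insert (key x) (d.getD (key x) 0 + coef x)) d0)).getD q 0 =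
        d0.getD q 0 + (L.map (fun x => if key x = q then coef x else 0)).sum := by
  intro L
  induction L with
  | nil => intro d0 q; simp
  | cons x t ih =>
    intro d0 q
    simp only [List.foldl_cons, List.map_cons, List.sum_cons]
    rw [ih]
    rw [PySem.Dict.getD_insert]
    by_cases hq : q = key x
    · rw [if_pos hq, if_pos hq.symm, hq]; ring
    · rw [if_neg hq, if_neg (fun h => hq h.symm)]; ring

-- zero-coefficient entries may be dropped without changing any lookup

theorem pvVal_filter_nz (l : List (List String × Int)) (hnd : (l.map Prod.fst).Nodup)
    (q : List String) : pvVal (l.filter (fun kv => kv.2 != 0)) q = pvVal l q := by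
  induction l with
  | nil => rfl
  | cons kv t ih =>
    obtain ⟨k, c⟩ := kv
    simp only [List.map_cons, List.nodup_cons] at hnd
    by_cases hz : (c != 0) = true
    · rw [show List.filter (fun kv => kv.2 != 0) ((k, c) :: t) = (k, c) :: List.filter (fun kv => kv.2 != 0) t from List.filter_cons_of_pos hz]
      simp only [pvVal]
      rw [ih hnd.2]
    · rw [show List.filter (fun kv => kv.2 != 0) ((k, c) :: t) = List.filter (fun kv => kv.2 != 0) t from List.filter_cons_of_neg hz]
      simp only [pvVal]
      by_cases hq : k = q
      · rw [if_pos hq, ih hnd.2]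
        have hc : c = 0 := by simpa using hz
        rw [hc]
        refine pvVal_eq_zero_of_forall_ne t q ?_
        intro kv hm hh
        have hmem : kv.1 ∈ List.map Prod.fst t := List.mem_map_of_mem hm
        rw [hh, ← hq] at hmem
        exact hnd.1 hmem
      · rw [if_neg hq, ih hnd.2]

theorem pvCount_filter_nz (l : List (List String × Int)) (k : List String) (v : Int) :
    List.count (k, v) (l.filter (fun kv => kv.2 != 0)) =
      if v ≠ 0 then List.count (k, v) l else 0 := by
  by_cases hv : v ≠ 0
  · rw [if_pos hv, List.count_filter (by simpa using hv)]
  · rw [if_neg hv]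
    refine List.count_eq_zero.mpr (fun hm => ?_)
    have h2 := (List.mem_filter.mp hm).2
    simp at h2
    exact hv (by simp [h2])

-- with distinct keys, the multiplicity of a pair is determined by the lookup function

theorem pvCount_nodup (l : List (List String × Int)) (hnd : (l.map Prod.fst).Nodup)
    (k : List String) (v : Int) :
    List.count (k, v) l = if k ∈ l.map Prod.fst ∧ pvVal l k = v then 1 else 0 := by
  induction l with
  | nil => simp
  | cons kv t ih =>
    obtain ⟨k0, c0⟩ := kv
    simp only [List.map_cons, List.nodup_cons] at hnd
    by_cases hk : k0 = k
    · subst hk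
      have ht0 : List.count (k0, v) t = 0 := by
        refine List.count_eq_zero.mpr (fun hm => ?_)
        exact hnd.1 (by exact List.mem_map_of_mem (f := Prod.fst) hm)
      by_cases hv : c0 = v
      · subst hv
        rw [List.count_cons_self, ht0]
        simp [pvVal]
      · rw [List.count_cons_of_ne (by simp [hv]), ht0]
        simp [pvVal, hv]
    · rw [List.count_cons_of_ne (by simp; intro h; exact absurd h (fun hh => hk hh))]
      rw [ih hnd.2]
      simp only [List.map_cons, List.mem_cons, pvVal]
      rw [if_neg hk]
      by_cases hm : k ∈ t.map Prod.fst ∧ pvVal t k = v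
      · rw [if_pos hm, if_pos ⟨Or.inr hm.1, hm.2⟩]
      · rw [if_neg hm, if_neg ?_]
        intro ⟨h1, h2⟩
        rcases h1 with h1 | h1
        · exact hk h1.symm
        · exact hm ⟨h1, h2⟩

theorem pvVal_ne_zero_mem (l : List (List String × Int)) (q : List String)
    (h : pvVal l q ≠ 0) : q ∈ l.map Prod.fst := by
  induction l with
  | nil => exact absurd rfl h
  | cons kv t ih =>
    obtain ⟨k, c⟩ := kv
    simp only [pvVal] at h
    by_cases hq : k = q
    · simp [hq]
    · rw [if_neg hq] at h
      simp only [List.map_cons, List.mem_cons]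
      exact Or.inr (ih h)

theorem pvVal_of_mem_nodup (l : List (List String × Int)) (hnd : (l.map Prod.fst).Nodup)
    (kv : List String × Int) (hm : kv ∈ l) : pvVal l kv.1 = kv.2 := by
  induction l with
  | nil => simp at hm
  | cons p t ih =>
    obtain ⟨k0, c0⟩ := p
    simp only [List.map_cons, List.nodup_cons] at hnd
    rcases List.mem_cons.mp hm with h | h
    · rw [h]; simp [pvVal]
    · simp only [pvVal]
      rw [if_neg ?_, ih hnd.2 h]
      intro hh
      exact hnd.1 (hh ▸ List.mem_map_of_mem (f := Prod.fst) h)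

-- THE bridge: the nonzero entries of a nodup-keys list are a permutation of the canonical list

theorem pvPermNZ (l : List (List String × Int)) (P : PvBPoly)
    (hnd : (l.map Prod.fst).Nodup) (hP : pvCanon P)
    (hval : ∀ q, pvVal l q = pvVal P q) :
    (l.filter (fun kv => kv.2 != 0)).Perm P := by
  have hndP := pvCanon_keys_nodup P hP
  refine List.perm_iff_count.mpr (fun a => ?_)
  obtain ⟨k, v⟩ := a
  rw [pvCount_filter_nz, pvCount_nodup l hnd, pvCount_nodup P hndP]
  by_cases hv : v ≠ 0
  · rw [if_pos hv]
    by_cases hc : k ∈ P.map Prod.fst ∧ pvVal P k = v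
    · rw [if_pos hc, if_pos ⟨pvVal_ne_zero_mem l k (by rw [hval]; rw [hc.2]; exact hv), by rw [hval]; exact hc.2⟩]
    · rw [if_neg hc, if_neg ?_]
      intro ⟨h1, h2⟩
      rw [hval] at h2
      exact hc ⟨pvVal_ne_zero_mem P k (by rw [h2]; exact hv), h2⟩
  · rw [if_neg hv]
    simp only [not_not] at hv
    subst hv
    rw [if_neg ?_]
    intro ⟨h1, h2⟩
    obtain ⟨kv, hmem, hfst⟩ := List.mem_map.mp h1
    have := pvVal_of_mem_nodup P hndP kv hmem
    rw [hfst] at this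
    rw [this] at h2
    exact hP.2 kv hmem h2

theorem pvWSum_filter_nz (l : List (List String × Int)) (w : List String → Int) :
    pvWSum (l.filter (fun kv => kv.2 != 0)) w = pvWSum l w := by
  induction l with
  | nil => rfl
  | cons kv t ih =>
    obtain ⟨k, c⟩ := kv
    by_cases hz : (c != 0) = true
    · rw [show List.filter (fun kv => kv.2 != 0) ((k, c) :: t) = (k, c) :: List.filter (fun kv => kv.2 != 0) t from List.filter_cons_of_pos hz]
      simp only [pvWSum, List.map_cons, List.sum_cons] at *
      rw [ih]
    · rw [show List.filter (fun kv => kv.2 != 0) ((k, c) :: t) = List.filter (fun kv => kv.2 != 0) t from List.filter_cons_of_neg hz]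
      have hc : c = 0 := by simpa using hz
      simp only [pvWSum, List.map_cons, List.sum_cons] at *
      rw [ih, hc, zero_mul, zero_add]

theorem pvWSum_congr (l : List (List String × Int)) (P : PvBPoly)
    (hnd : (l.map Prod.fst).Nodup) (hP : pvCanon P)
    (hval : ∀ q, pvVal l q = pvVal P q) (w : List String → Int) :
    pvWSum l w = pvWSum P w := by
  rw [← pvWSum_filter_nz l w]
  exact List.Perm.sum_eq (List.Perm.map _ (pvPermNZ l P hnd hP hval))

-- ----- relating the A-side dict operations to the B-side canonical-list operations -----

theorem pvGetD_items (d : PvPoly) (q : List String) : d.getD q 0 = pvVal d.items q := by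
  cases d; exact pvGetD_mk _ _

theorem pvKeys_eq (d : PvPoly) : d.keys = d.items.map Prod.fst := rfl

theorem pvR_empty : pvR PySem.Dict.empty [] := by
  refine ⟨by simp [PySem.Dict.empty], pvCanon_nil, fun q => ?_⟩
  rw [PySem.Dict.getD_empty]; rfl

theorem pvR_makeInt (v : Int) : pvR (pvAMakeInt v) (pvAddTerm [] [] v) := by
  refine ⟨?_, pvAddTerm_canon [] [] v pvCanon_nil, fun q => ?_⟩
  · exact PySem.Dict.nodup_keys_insert PySem.Dict.empty [] v PySem.Dict.nodup_keys_empty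
  · rw [pvAddTerm_val [] [] v pvCanon_nil q]
    simp only [pvVal, zero_add, pvAMakeInt]
    rw [PySem.Dict.getD_insert]
    by_cases hq : q = ([] : List String)
    · rw [if_pos hq, if_pos hq.symm]
    · rw [if_neg hq, if_neg (fun h => hq h.symm), PySem.Dict.getD_empty]

theorem pvR_makeVar (s : String) : pvR (pvAMakeVar s) (pvAddTerm [] [s] 1) := by
  refine ⟨?_, pvAddTerm_canon [] [s] 1 pvCanon_nil, fun q => ?_⟩
  · exact PySem.Dict.nodup_keys_insert PySem.Dict.empty [s] 1 PySem.Dict.nodup_keys_empty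
  · rw [pvAddTerm_val [] [s] 1 pvCanon_nil q]
    simp only [pvVal, zero_add, pvAMakeVar]
    rw [PySem.Dict.getD_insert]
    by_cases hq : q = [s]
    · rw [if_pos hq, if_pos hq.symm]
    · rw [if_neg hq, if_neg (fun h => hq h.symm), PySem.Dict.getD_empty]

theorem pvSumAt_neg (l : List (List String × Int)) (q : List String) :
    (l.map (fun kv => if kv.1 = q then -kv.2 else 0)).sum = -pvSumAt l q := by
  induction l with
  | nil => rfl
  | cons kv t ih =>
    simp only [pvSumAt, List.map_cons, List.sum_cons] at *
    rw [ih]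
    by_cases hq : kv.1 = q
    · rw [if_pos hq, if_pos hq]; ring
    · rw [if_neg hq, if_neg hq]; ring

theorem pvAdd_rel (d e : PvPoly) (P Q : PvBPoly) (hd : pvR d P) (he : pvR e Q) :
    pvR (e.items.foldl (fun d kv => d.insert kv.1 (d.getD kv.1 0 + kv.2)) d) (pvPadd P Q) := by
  obtain ⟨hdn, hdC, hdv⟩ := hd
  obtain ⟨hen, heC, hev⟩ := he
  have hB := pvFoldl_addTerm (fun kv : List String × Int => kv.1) (fun kv => kv.2) Q P hdC
  have hBC : pvCanon (pvPadd P Q) := hB.1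
  have hBV : ∀ q, pvVal (pvPadd P Q) q =
      pvVal P q + (Q.map (fun kv => if kv.1 = q then kv.2 else 0)).sum := hB.2
  refine ⟨?_, hBC, fun q => ?_⟩
  · exact PySem.Dict.nodup_keys_foldl_insert_key e.items (fun kv => kv.1)
      (fun d kv => d.getD kv.1 0 + kv.2) d hdn
  · rw [pvGetD_foldl_acc (fun kv : List String × Int => kv.1) (fun kv => kv.2) e.items d q]
    rw [hBV q]
    have h1 : (e.items.map (fun kv => if kv.1 = q then kv.2 else 0)).sum = pvVal Q q := by
      rw [show (e.items.map (fun kv => if kv.1 = q then kv.2 else 0)).sum = pvSumAt e.items q from rfl]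
      rw [pvSumAt_eq_pvVal e.items hen q, ← pvGetD_items, hev q]
    have h2 : (Q.map (fun kv => if kv.1 = q then kv.2 else 0)).sum = pvVal Q q := by
      rw [show (Q.map (fun kv => if kv.1 = q then kv.2 else 0)).sum = pvSumAt Q q from rfl]
      exact pvSumAt_eq_pvVal Q (pvCanon_keys_nodup Q heC) q
    rw [h1, h2, hdv q]

theorem pvNeg_rel (e : PvPoly) (Q : PvBPoly) (he : pvR e Q) :
    pvR (pvACombine PySem.Dict.empty e "-") (pvPneg Q) := by
  obtain ⟨hen, heC, hev⟩ := he
  have hbody : e.items.foldl (fun d kv => d.insert kv.1 (d.getD kv.1 0 - kv.2))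
      (PySem.Dict.empty : PvPoly) =
      e.items.foldl (fun d kv => d.insert kv.1 (d.getD kv.1 0 + -kv.2)) PySem.Dict.empty := by
    exact PySem.List.foldl_congr_mem e.items _ _ _ (fun acc kv _ => by rw [sub_eq_add_neg])
  have hres : ∀ q, (e.items.foldl (fun d kv => d.insert kv.1 (d.getD kv.1 0 - kv.2))
      (PySem.Dict.empty : PvPoly)).getD q 0 = -pvVal Q q := by
    intro q
    rw [hbody, pvGetD_foldl_acc (fun kv : List String × Int => kv.1) (fun kv => -kv.2) e.items
      PySem.Dict.empty q]
    rw [PySem.Dict.getD_empty, pvSumAt_neg e.items q, pvSumAt_eq_pvVal e.items hen q,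
      ← pvGetD_items, hev q]
    ring
  have hresn : (e.items.foldl (fun d kv => d.insert kv.1 (d.getD kv.1 0 - kv.2))
      (PySem.Dict.empty : PvPoly)).keys.Nodup :=
    PySem.Dict.nodup_keys_foldl_insert_key e.items (fun kv => kv.1)
      (fun d kv => d.getD kv.1 0 - kv.2) PySem.Dict.empty PySem.Dict.nodup_keys_empty
  rw [show pvACombine PySem.Dict.empty e "-" =
      PySem.Dict.mk (((PySem.Dict.empty : PvPoly).items.foldl
          (fun d kv => d.insert kv.1 (d.getD kv.1 0 + kv.2)) (PySem.Dict.empty : PvPoly)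
        |> (fun r => e.items.foldl (fun d kv => d.insert kv.1 (d.getD kv.1 0 - kv.2)) r)).items.filter
        (fun kv => kv.2 != 0)) from by simp [pvACombine]]
  have hstart : ((PySem.Dict.empty : PvPoly).items.foldl
      (fun d kv => d.insert kv.1 (d.getD kv.1 0 + kv.2)) (PySem.Dict.empty : PvPoly)
      |> (fun r => e.items.foldl (fun d kv => d.insert kv.1 (d.getD kv.1 0 - kv.2)) r)) =
      e.items.foldl (fun d kv => d.insert kv.1 (d.getD kv.1 0 - kv.2)) PySem.Dict.empty := rfl
  rw [hstart]
  refine ⟨?_, pvPneg_canon Q heC, fun q => ?_⟩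
  · rw [pvKeys_eq] at hresn ⊢
    rw [show (PySem.Dict.mk ((e.items.foldl (fun d kv => d.insert kv.1 (d.getD kv.1 0 - kv.2))
        (PySem.Dict.empty : PvPoly)).items.filter (fun kv => kv.2 != 0))).items =
      (e.items.foldl (fun d kv => d.insert kv.1 (d.getD kv.1 0 - kv.2))
        (PySem.Dict.empty : PvPoly)).items.filter (fun kv => kv.2 != 0) from rfl]
    exact List.Nodup.sublist (List.Sublist.map Prod.fst List.filter_sublist) hresn
  · rw [pvGetD_mk, pvVal_filter_nz _ (by rw [pvKeys_eq] at hresn; exact hresn) q,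
      ← pvGetD_items, hres q, pvPneg_val Q q]

theorem pvGetD_mulfold (b : PvPoly) :
    ∀ (L : List (List String × Int)) (d : PvPoly) (q : List String),
      (L.foldl (fun d kv1 => b.items.foldl (fun d kv2 =>
          d.insert (PySem.List.sorted (kv1.1 ++ kv2.1) (fun s => s) false)
            (d.getD (PySem.List.sorted (kv1.1 ++ kv2.1) (fun s => s) false) 0 + kv1.2 * kv2.2)) d) d).getD q 0 =
      d.getD q 0 + (L.map (fun kv1 => (b.items.map (fun kv2 =>
        if PySem.List.sorted (kv1.1 ++ kv2.1) (fun s => s) false = q then kv1.2 * kv2.2 else 0)).sum)).sum := by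
  intro L
  induction L with
  | nil => intro d q; simp
  | cons x t ih =>
    intro d q
    simp only [List.foldl_cons, List.map_cons, List.sum_cons]
    rw [ih]
    rw [pvGetD_foldl_acc (fun kv2 : List String × Int =>
        PySem.List.sorted (x.1 ++ kv2.1) (fun s => s) false) (fun kv2 => x.2 * kv2.2) b.items d q]
    ring

theorem pvMulfold_nodup (b : PvPoly) :
    ∀ (L : List (List String × Int)) (d : PvPoly), d.keys.Nodup →
      (L.foldl (fun d kv1 => b.items.foldl (fun d kv2 =>
          d.insert (PySem.List.sorted (kv1.1 ++ kv2.1) (fun s => s) false)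
            (d.getD (PySem.List.sorted (kv1.1 ++ kv2.1) (fun s => s) false) 0 + kv1.2 * kv2.2)) d) d).keys.Nodup := by
  intro L
  induction L with
  | nil => intro d h; exact h
  | cons x t ih =>
    intro d h
    simp only [List.foldl_cons]
    exact ih _ (PySem.Dict.nodup_keys_foldl_insert_key b.items
      (fun kv2 => PySem.List.sorted (x.1 ++ kv2.1) (fun s => s) false)
      (fun d kv2 => d.getD (PySem.List.sorted (x.1 ++ kv2.1) (fun s => s) false) 0 + x.2 * kv2.2) d h)

theorem pvPmulfold (Q : PvBPoly) :
    ∀ (L : List (List String × Int)) (R : PvBPoly), pvCanon R →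
      pvCanon (L.foldl (fun res kv1 => Q.foldl (fun res kv2 =>
        pvAddTerm res (PySem.List.sorted (kv1.1 ++ kv2.1) (fun s => s) false) (kv1.2 * kv2.2)) res) R) ∧
      ∀ q, pvVal (L.foldl (fun res kv1 => Q.foldl (fun res kv2 =>
        pvAddTerm res (PySem.List.sorted (kv1.1 ++ kv2.1) (fun s => s) false) (kv1.2 * kv2.2)) res) R) q =
        pvVal R q + (L.map (fun kv1 => (Q.map (fun kv2 =>
          if PySem.List.sorted (kv1.1 ++ kv2.1) (fun s => s) false = q then kv1.2 * kv2.2 else 0)).sum)).sum := by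
  intro L
  induction L with
  | nil => intro R h; exact ⟨h, fun q => by simp⟩
  | cons x t ih =>
    intro R h
    have hin := pvFoldl_addTerm (fun kv2 : List String × Int =>
      PySem.List.sorted (x.1 ++ kv2.1) (fun s => s) false) (fun kv2 => x.2 * kv2.2) Q R h
    obtain ⟨ih1, ih2⟩ := ih _ hin.1
    refine ⟨ih1, fun q => ?_⟩
    simp only [List.foldl_cons, List.map_cons, List.sum_cons]
    rw [ih2 q, hin.2 q]
    ring

theorem pvInnerW (r : List (List String × Int)) (k1 : List String) (c1 : Int) (q : List String) :
    (r.map (fun kv2 => if PySem.List.sorted (k1 ++ kv2.1) (fun s => s) false = q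
        then c1 * kv2.2 else 0)).sum
      = c1 * pvWSum r (fun k2 => if PySem.List.sorted (k1 ++ k2) (fun s => s) false = q
        then 1 else 0) := by
  induction r with
  | nil => simp [pvWSum]
  | cons kv t ih =>
    simp only [pvWSum, List.map_cons, List.sum_cons] at *
    rw [ih]
    by_cases h : PySem.List.sorted (k1 ++ kv.1) (fun s => s) false = q
    · rw [if_pos h, if_pos h]; ring
    · rw [if_neg h, if_neg h]; ring

theorem pvMul_rel (a b : PvPoly) (P Q : PvBPoly) (ha : pvR a P) (hb : pvR b Q) :
    pvR (pvACombine a b "*") (pvPmul P Q) := by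
  obtain ⟨han, haC, hav⟩ := ha
  obtain ⟨hbn, hbC, hbv⟩ := hb
  rw [pvKeys_eq] at han hbn
  have hvalsa : ∀ q, pvVal a.items q = pvVal P q := fun q => by rw [← pvGetD_items]; exact hav q
  have hvalsb : ∀ q, pvVal b.items q = pvVal Q q := fun q => by rw [← pvGetD_items]; exact hbv q
  have hBf := pvPmulfold Q P [] pvCanon_nil
  have hBC : pvCanon (pvPmul P Q) := hBf.1
  have hBV : ∀ q, pvVal (pvPmul P Q) q = (P.map (fun kv1 => (Q.map (fun kv2 =>
      if PySem.List.sorted (kv1.1 ++ kv2.1) (fun s => s) false = q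
      then kv1.2 * kv2.2 else 0)).sum)).sum := by
    intro q
    have := hBf.2 q
    rw [show pvVal ([] : PvBPoly) q = 0 from rfl, zero_add] at this
    exact this
  have hresn : (a.items.foldl (fun d kv1 => b.items.foldl (fun d kv2 =>
      d.insert (PySem.List.sorted (kv1.1 ++ kv2.1) (fun s => s) false)
        (d.getD (PySem.List.sorted (kv1.1 ++ kv2.1) (fun s => s) false) 0 + kv1.2 * kv2.2)) d)
      (PySem.Dict.empty : PvPoly)).keys.Nodup :=
    pvMulfold_nodup b a.items PySem.Dict.empty PySem.Dict.nodup_keys_empty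
  rw [show pvACombine a b "*" = PySem.Dict.mk ((a.items.foldl (fun d kv1 =>
      b.items.foldl (fun d kv2 =>
        d.insert (PySem.List.sorted (kv1.1 ++ kv2.1) (fun s => s) false)
          (d.getD (PySem.List.sorted (kv1.1 ++ kv2.1) (fun s => s) false) 0 + kv1.2 * kv2.2)) d)
      (PySem.Dict.empty : PvPoly)).items.filter (fun kv => kv.2 != 0)) from by simp [pvACombine]]
  refine ⟨?_, hBC, fun q => ?_⟩
  · rw [pvKeys_eq] at hresn ⊢
    exact List.Nodup.sublist (List.Sublist.map Prod.fst List.filter_sublist) hresn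
  · rw [pvGetD_mk, pvVal_filter_nz _ (by rw [pvKeys_eq] at hresn; exact hresn) q,
      ← pvGetD_items, pvGetD_mulfold b a.items PySem.Dict.empty q, PySem.Dict.getD_empty, zero_add,
      hBV q]
    have hstepA : (a.items.map (fun kv1 => (b.items.map (fun kv2 =>
        if PySem.List.sorted (kv1.1 ++ kv2.1) (fun s => s) false = q
        then kv1.2 * kv2.2 else 0)).sum)).sum =
        pvWSum a.items (fun k1 => pvWSum Q (fun k2 =>
          if PySem.List.sorted (k1 ++ k2) (fun s => s) false = q then 1 else 0)) := by
      refine congrArg List.sum (List.map_congr_left (fun kv1 _ => ?_))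
      rw [pvInnerW b.items kv1.1 kv1.2 q,
        pvWSum_congr b.items Q hbn hbC hvalsb]
    have hstepP : (P.map (fun kv1 => (Q.map (fun kv2 =>
        if PySem.List.sorted (kv1.1 ++ kv2.1) (fun s => s) false = q
        then kv1.2 * kv2.2 else 0)).sum)).sum =
        pvWSum P (fun k1 => pvWSum Q (fun k2 =>
          if PySem.List.sorted (k1 ++ k2) (fun s => s) false = q then 1 else 0)) := by
      refine congrArg List.sum (List.map_congr_left (fun kv1 _ => ?_))
      rw [pvInnerW Q kv1.1 kv1.2 q]
    rw [hstepA, hstepP]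
    exact pvWSum_congr a.items P han haC hvalsa _

-- ----- the simulation of A's recursive parse by B's forward scan -----

-- abstraction of an A-side stack as (sum of all but the top, top)
def pvT : List PvPoly → PvPoly × PvPoly
  | [] => (PySem.Dict.empty, PySem.Dict.empty)
  | c :: s => (pvASum s, c)

-- the relation between an A-side operand stack and B's running (total, cur) state
def pvRelTC (stack : List PvPoly) (total cur : PvBPoly) : Prop :=
  pvR (pvT stack).1 total ∧ pvR (pvT stack).2 cur

-- the relation between A's caller contexts and B's frame stack
def pvRelCtx (ctxs : List (List PvPoly × String)) (frames : List (PvBPoly × PvBPoly × String)) : Prop :=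
  List.Forall₂ (fun c f => pvRelTC c.1 f.1 f.2.1 ∧ c.2 = f.2.2) ctxs frames

theorem pvASum_nil : pvASum [] = PySem.Dict.empty := rfl

theorem pvASum_cons (c : PvPoly) (s : List PvPoly) :
    pvASum (c :: s) =
      c.items.foldl (fun d kv => d.insert kv.1 (d.getD kv.1 0 + kv.2)) (pvASum s) := by
  simp [pvASum, List.foldl_append]

theorem pvSum_rel (stack : List PvPoly) (total cur : PvBPoly)
    (h : pvRelTC stack total cur) : pvR (pvASum stack) (pvPadd total cur) := by
  obtain ⟨h1, h2⟩ := h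
  cases stack with
  | nil =>
    have := pvAdd_rel PySem.Dict.empty PySem.Dict.empty total cur h1 h2
    simpa [pvASum_nil, pvT] using this
  | cons c s =>
    rw [pvASum_cons]
    exact pvAdd_rel (pvASum s) c total cur h1 h2

theorem pvPush_rel (stack : List PvPoly) (total cur : PvBPoly) (op : String)
    (val : PvPoly) (V : PvBPoly) (h : pvRelTC stack total cur) (hv : pvR val V) :
    pvRelTC (pvAPush stack op val) (pvBApply total cur op V).1 (pvBApply total cur op V).2 := by
  obtain ⟨h1, h2⟩ := h
  by_cases hop1 : op == "+"
  · constructor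
    · simp only [pvAPush, pvBApply, if_pos hop1]
      cases stack with
      | nil => simpa [pvT, pvASum_nil] using pvSum_rel [] total cur ⟨h1, h2⟩
      | cons c s => simpa [pvT] using pvSum_rel (c :: s) total cur ⟨h1, h2⟩
    · simp only [pvAPush, pvBApply, if_pos hop1]
      simpa [pvT] using hv
  · by_cases hop2 : op == "-"
    · constructor
      · simp only [pvAPush, pvBApply, if_neg hop1, if_pos hop2]
        cases stack with
        | nil => simpa [pvT, pvASum_nil] using pvSum_rel [] total cur ⟨h1, h2⟩
        | cons c s => simpa [pvT] using pvSum_rel (c :: s) total cur ⟨h1, h2⟩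
      · simp only [pvAPush, pvBApply, if_neg hop1, if_pos hop2]
        simpa [pvT] using pvNeg_rel val V hv
    · constructor
      · simp only [pvAPush, pvBApply, if_neg hop1, if_neg hop2]
        cases stack with
        | nil => simpa [pvT] using h1
        | cons c s => simpa [pvT] using h1
      · simp only [pvAPush, pvBApply, if_neg hop1, if_neg hop2]
        cases stack with
        | nil => simpa [pvT] using pvMul_rel PySem.Dict.empty val cur V (by simpa [pvT] using h2) hv
        | cons c s => simpa [pvT] using pvMul_rel c val cur V (by simpa [pvT] using h2) hv

-- A's remaining computation after the current parse level, with the caller contexts explicit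
def pvRunA (lookup : PySem.Dict String Int) (ts : List String)
    (ctxs : List (List PvPoly × String)) (stack : List PvPoly) (op : String) : PvPoly :=
  match ctxs with
  | [] => (pvAParse lookup ts stack op).1
  | (s0, o0) :: cs =>
    let pr := pvAParse lookup ts stack op
    pvRunA lookup pr.2.1 cs (pvAPush s0 o0 pr.1) o0
  termination_by ts.length + ctxs.length
  decreasing_by simp_wf; have h2 := (pvAParse lookup ts stack op).2.2; omega

theorem pvRunA_congr (lookup : PySem.Dict String Int) (ts ts' : List String)
    (stack stack' : List PvPoly) (op op' : String)
    (h1 : (pvAParse lookup ts stack op).1 = (pvAParse lookup ts' stack' op').1)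
    (h2 : (pvAParse lookup ts stack op).2.1 = (pvAParse lookup ts' stack' op').2.1) :
    ∀ ctxs, pvRunA lookup ts ctxs stack op = pvRunA lookup ts' ctxs stack' op' := by
  intro ctxs
  cases ctxs with
  | nil => rw [pvRunA, pvRunA]; exact h1
  | cons c cs => obtain ⟨s0, o0⟩ := c; rw [pvRunA, pvRunA]; rw [h1, h2]

theorem pvRunA_lparen (lookup : PySem.Dict String Int) (rest : List String)
    (ctxs : List (List PvPoly × String)) (stack : List PvPoly) (op : String) :
    pvRunA lookup ("(" :: rest) ctxs stack op = pvRunA lookup rest ((stack, op) :: ctxs) [] "+" := by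
  cases ctxs with
  | nil =>
    rw [pvRunA, pvRunA, pvRunA]
    simp [pvAParse]
  | cons c cs =>
    obtain ⟨s0, o0⟩ := c
    rw [pvRunA, pvRunA, pvRunA]
    simp [pvAParse]

theorem pvRunA_rparen_nil (lookup : PySem.Dict String Int) (rest : List String)
    (stack : List PvPoly) (op : String) :
    pvRunA lookup (")" :: rest) [] stack op = pvASum stack := by
  rw [pvRunA]; simp [pvAParse]

theorem pvRunA_rparen_cons (lookup : PySem.Dict String Int) (rest : List String)
    (s0 : List PvPoly) (o0 : String) (cs : List (List PvPoly × String))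
    (stack : List PvPoly) (op : String) :
    pvRunA lookup (")" :: rest) ((s0, o0) :: cs) stack op =
      pvRunA lookup rest cs (pvAPush s0 o0 (pvASum stack)) o0 := by
  rw [pvRunA]; simp [pvAParse]

theorem pvUnwind_rel (lookup : PySem.Dict String Int) :
    ∀ (ctxs : List (List PvPoly × String)) (frames : List (PvBPoly × PvBPoly × String))
      (stack : List PvPoly) (total cur : PvBPoly) (op : String),
      pvRelCtx ctxs frames → pvRelTC stack total cur →
      pvR (pvRunA lookup [] ctxs stack op) (pvBUnwind frames total cur) := by
  intro ctxs
  induction ctxs with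
  | nil =>
    intro frames stack total cur op hc ht
    cases hc
    rw [pvRunA]
    simp only [pvAParse, pvBUnwind]
    exact pvSum_rel stack total cur ht
  | cons c cs ih =>
    intro frames stack total cur op hc ht
    obtain ⟨s0, o0⟩ := c
    cases hc with
    | cons hf hrest =>
      rename_i f fs
      obtain ⟨t0, c0, oo⟩ := f
      obtain ⟨hftc, hfop⟩ := hf
      rw [pvRunA]
      simp only [pvAParse, pvBUnwind]
      have hval := pvSum_rel stack total cur ht
      have hpush := pvPush_rel s0 t0 c0 o0 (pvASum stack) (pvPadd total cur) hftc hval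
      simp only at hfop
      subst hfop
      exact ih fs (pvAPush s0 o0 (pvASum stack)) _ _ o0 hrest hpush

theorem pvMain_rel (lookup : PySem.Dict String Int) :
    ∀ (n : Nat) (ts : List String), ts.length ≤ n →
    ∀ (ctxs : List (List PvPoly × String)) (frames : List (PvBPoly × PvBPoly × String))
      (stack : List PvPoly) (total cur : PvBPoly) (op : String),
      pvRelCtx ctxs frames → pvRelTC stack total cur →
      pvR (pvRunA lookup ts ctxs stack op) (pvBScan lookup ts frames total cur op) := by
  intro n
  induction n with
  | zero =>
    intro ts h ctxs frames stack total cur op hc ht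
    have hts : ts = [] := List.eq_nil_of_length_eq_zero (Nat.le_zero.mp h)
    subst hts
    simpa [pvBScan] using pvUnwind_rel lookup ctxs frames stack total cur op hc ht
  | succ n ih =>
    intro ts h ctxs frames stack total cur op hc ht
    cases ts with
    | nil => simpa [pvBScan] using pvUnwind_rel lookup ctxs frames stack total cur op hc ht
    | cons t rest =>
      have hr : rest.length ≤ n := by simp at h; omega
      by_cases c1 : (t == "(") = true
      · have ht' : t = "(" := by simpa using c1
        subst ht'
        rw [pvRunA_lparen]
        rw [show pvBScan lookup ("(" :: rest) frames total cur op =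
              pvBScan lookup rest ((total, cur, op) :: frames) [] [] "+" from by simp [pvBScan]]
        exact ih rest hr ((stack, op) :: ctxs) ((total, cur, op) :: frames) [] [] [] "+"
          (List.Forall₂.cons ⟨ht, rfl⟩ hc) ⟨pvR_empty, pvR_empty⟩
      · by_cases c2 : (t == ")") = true
        · have ht' : t = ")" := by simpa using c2
          subst ht'
          cases hc with
          | nil =>
            rw [pvRunA_rparen_nil]
            rw [show pvBScan lookup (")" :: rest) [] total cur op = pvPadd total cur from by
              simp [pvBScan]]
            exact pvSum_rel stack total cur ht
          | cons hf hrest =>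
            rename_i c f cs fs
            obtain ⟨s0, o0⟩ := c
            obtain ⟨t0, c0, oo⟩ := f
            obtain ⟨hftc, hfop⟩ := hf
            simp only at hfop
            subst hfop
            rw [pvRunA_rparen_cons]
            rw [show pvBScan lookup (")" :: rest) ((t0, c0, o0) :: fs) total cur op =
                  pvBScan lookup rest fs (pvBApply t0 c0 o0 (pvPadd total cur)).1
                    (pvBApply t0 c0 o0 (pvPadd total cur)).2 o0 from by simp [pvBScan]]
            exact ih rest hr cs fs (pvAPush s0 o0 (pvASum stack)) _ _ o0 hrest
              (pvPush_rel s0 t0 c0 o0 (pvASum stack) (pvPadd total cur) hftc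
                (pvSum_rel stack total cur ht))
        · by_cases c3 : PySem.Chars.strIsdigit (t.toList.dropWhile (· == '-')) = true
          · rw [pvRunA_congr lookup (t :: rest) rest stack
              (pvAPush stack op (pvAMakeInt ((PySem.Int.ofStr? t).getD 0))) op op
              (by simp [pvAParse, pvAMakeInt, c1, c2, c3])
              (by simp [pvAParse, pvAMakeInt, c1, c2, c3]) ctxs]
            rw [show pvBScan lookup (t :: rest) frames total cur op =
                  pvBScan lookup rest frames
                    (pvBApply total cur op (pvAddTerm [] [] ((PySem.Int.ofStr? t).getD 0))).1
                    (pvBApply total cur op (pvAddTerm [] [] ((PySem.Int.ofStr? t).getD 0))).2 op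
                from by simp [pvBScan, c1, c2, c3]]
            exact ih rest hr ctxs frames _ _ _ op hc
              (pvPush_rel stack total cur op _ _ ht (pvR_makeInt _))
          · by_cases c4 : lookup.contains t = true
            · rw [pvRunA_congr lookup (t :: rest) rest stack
                (pvAPush stack op (pvAMakeInt (lookup.getD t 0))) op op
                (by simp [pvAParse, pvAMakeInt, c1, c2, c3, c4])
                (by simp [pvAParse, pvAMakeInt, c1, c2, c3, c4]) ctxs]
              rw [show pvBScan lookup (t :: rest) frames total cur op =
                    pvBScan lookup rest frames
                      (pvBApply total cur op (pvAddTerm [] [] (lookup.getD t 0))).1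
                      (pvBApply total cur op (pvAddTerm [] [] (lookup.getD t 0))).2 op
                  from by simp [pvBScan, c1, c2, c3, c4]]
              exact ih rest hr ctxs frames _ _ _ op hc
                (pvPush_rel stack total cur op _ _ ht (pvR_makeInt _))
            · by_cases c5 : PySem.Chars.isIn t.toList ['+', '-', '*'] = true
              · rw [pvRunA_congr lookup (t :: rest) rest stack stack op t
                  (by simp [pvAParse, c1, c2, c3, c4, c5])
                  (by simp [pvAParse, c1, c2, c3, c4, c5]) ctxs]
                rw [show pvBScan lookup (t :: rest) frames total cur op =
                      pvBScan lookup rest frames total cur t from by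
                    simp [pvBScan, c1, c2, c3, c4, c5]]
                exact ih rest hr ctxs frames stack total cur t hc ht
              · rw [pvRunA_congr lookup (t :: rest) rest stack
                  (pvAPush stack op (pvAMakeVar t)) op op
                  (by simp [pvAParse, pvAMakeVar, c1, c2, c3, c4, c5])
                  (by simp [pvAParse, pvAMakeVar, c1, c2, c3, c4, c5]) ctxs]
                rw [show pvBScan lookup (t :: rest) frames total cur op =
                      pvBScan lookup rest frames
                        (pvBApply total cur op (pvAddTerm [] [t] 1)).1
                        (pvBApply total cur op (pvAddTerm [] [t] 1)).2 op
                    from by simp [pvBScan, c1, c2, c3, c4, c5]]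
                exact ih rest hr ctxs frames _ _ _ op hc
                  (pvPush_rel stack total cur op _ _ ht (pvR_makeVar t))

-- ----- the final formatting pass -----

theorem pvOut_eq (d : PvPoly) (P : PvBPoly) (h : pvR d P) :
    (PySem.List.sorted d.items (fun x => toLex (-(x.1.length : Int), x.1)) false).filter
      (fun kv => kv.2 != 0) = P := by
  obtain ⟨hn, hC, hv⟩ := h
  rw [pvKeys_eq] at hn
  have hvals : ∀ q, pvVal d.items q = pvVal P q := fun q => by rw [← pvGetD_items]; exact hv q
  have hperm1 : (d.items.filter (fun kv => kv.2 != 0)).Perm P := pvPermNZ d.items P hn hC hvals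
  have hsp : (PySem.List.sorted d.items (fun x => toLex (-(x.1.length : Int), x.1)) false).Perm
      d.items := PySem.List.sorted_perm d.items _ false
  have hperm : ((PySem.List.sorted d.items (fun x => toLex (-(x.1.length : Int), x.1)) false).filter
      (fun kv => kv.2 != 0)).Perm P := (hsp.filter _).trans hperm1
  have hpair_le := PySem.List.sorted_pairwise d.items
    (fun x : List String × Int => toLex (-(x.1.length : Int), x.1))
  have hfil_le : ((PySem.List.sorted d.items (fun x => toLex (-(x.1.length : Int), x.1)) false).filter
      (fun kv => kv.2 != 0)).Pairwise (fun a b =>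
        (toLex (-(a.1.length : Int), a.1) : Lex (Int × List String)) ≤ toLex (-(b.1.length : Int), b.1)) :=
    List.Pairwise.sublist List.filter_sublist hpair_le
  have hndf : (((PySem.List.sorted d.items (fun x => toLex (-(x.1.length : Int), x.1)) false).filter
      (fun kv => kv.2 != 0)).map Prod.fst).Nodup :=
    (hperm.map Prod.fst).nodup_iff.mpr (pvCanon_keys_nodup P hC)
  have hne : ((PySem.List.sorted d.items (fun x => toLex (-(x.1.length : Int), x.1)) false).filter
      (fun kv => kv.2 != 0)).Pairwise (fun a b => a.1 ≠ b.1) := List.pairwise_map.mp hndf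
  have hlt : ((PySem.List.sorted d.items (fun x => toLex (-(x.1.length : Int), x.1)) false).filter
      (fun kv => kv.2 != 0)).Pairwise (fun a b => pvKeyOf a.1 < pvKeyOf b.1) := by
    refine (hfil_le.and hne).imp ?_
    rintro a b ⟨hle, hab⟩
    exact lt_of_le_of_ne hle (fun he => hab (pvKeyOf_inj _ _ he))
  exact hperm.eq_of_pairwise (fun a b _ _ hab hba => absurd (lt_trans hab hba) (lt_irrefl _)) hlt hC.1

-- ===== VERDICT =====
theorem basicCalculatorIV_spec : Claim_equal_basicCalculatorIV := by
  intro expression evalvars evalints _hDom _hPre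
  unfold Spec_basicCalculatorIV basicCalculatorIV basicCalculatorIV_alt
  dsimp only
  have hrel := pvMain_rel
    ((evalvars.zip evalints).foldl (fun d kv => d.insert kv.1 kv.2) PySem.Dict.empty)
    (PySem.Str.split₀ (PySem.Str.replace (PySem.Str.replace expression "(" "( ") ")" " )")).length
    (PySem.Str.split₀ (PySem.Str.replace (PySem.Str.replace expression "(" "( ") ")" " )"))
    (Nat.le_refl _) [] [] [] [] [] "+" List.Forall₂.nil ⟨pvR_empty, pvR_empty⟩
  rw [show pvRunA ((evalvars.zip evalints).foldl (fun d kv => d.insert kv.1 kv.2) PySem.Dict.empty)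
        (PySem.Str.split₀ (PySem.Str.replace (PySem.Str.replace expression "(" "( ") ")" " )"))
        [] [] "+" =
      (pvAParse ((evalvars.zip evalints).foldl (fun d kv => d.insert kv.1 kv.2) PySem.Dict.empty)
        (PySem.Str.split₀ (PySem.Str.replace (PySem.Str.replace expression "(" "( ") ")" " )"))
        [] "+").1 from by rw [pvRunA]] at hrel
  rw [pvOut_eq _ _ hrel]
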